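-- pv_equiv track=rewrite | github.com/welli7ngton/Python | Funções/Recursividade/exercicio10.py | negpos
-- ===== SOURCE A (Python) =====
-- def negpos(lista, pos=0, dif=0, posi=0, neg=0):
--
--     if pos == len(lista):
--         return dif
--     if lista[pos] > 0:
--         posi += 1
--     else:
--         neg += 1
--     pos += 1
--     dif += posi - neg
--     return negpos(lista, pos, dif)
-- ===== SOURCE B (Python) =====
-- def negpos(lista, pos=0, dif=0, posi=0, neg=0):
--     if pos == len(lista):
--         return dif
--     tail = sum(1 if lista[i] > 0 else -1 for i in range(pos, len(lista)))
--     return dif + posi - neg + tail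
-- ===== Notes on version B (the rewrite author's own statement) =====
-- stated objective: simpler
-- what changed: Replaced A's five-parameter self-recursion with a closed form: dif plus a one-time posi-neg plus the signed +1/-1 count of the elements from index pos, computed by a single sum.
import Mathlib
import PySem

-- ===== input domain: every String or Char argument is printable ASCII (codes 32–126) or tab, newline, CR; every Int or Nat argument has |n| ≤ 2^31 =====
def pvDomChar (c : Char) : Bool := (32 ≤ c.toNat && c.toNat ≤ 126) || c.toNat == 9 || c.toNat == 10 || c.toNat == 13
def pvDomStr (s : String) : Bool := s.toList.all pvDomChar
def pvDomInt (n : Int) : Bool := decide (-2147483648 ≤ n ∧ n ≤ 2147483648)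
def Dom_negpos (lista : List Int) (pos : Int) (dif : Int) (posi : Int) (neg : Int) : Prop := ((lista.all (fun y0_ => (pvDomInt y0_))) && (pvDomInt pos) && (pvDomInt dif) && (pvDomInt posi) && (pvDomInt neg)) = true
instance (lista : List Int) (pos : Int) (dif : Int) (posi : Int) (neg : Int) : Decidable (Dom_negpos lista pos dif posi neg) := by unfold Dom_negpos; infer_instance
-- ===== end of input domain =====

-- B replaces A's five-parameter self-recursion by one counter step for the current element
-- followed by a closed-form ±1 sum over the remaining indices; objective: alternative.


-- ===== PORT A =====
-- literal transliteration of A's recursion; 'none' from pyGet? is Python's IndexError (excluded by Pre_)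
def negpos (lista : List Int) (pos : Int) (dif : Int) (posi : Int) (neg : Int) : Int :=
  if pos = (lista.length : Int) then dif
  else
    match h : PySem.List.pyGet? lista pos with
    | none => 0  -- Python raises IndexError here; Pre_negpos excludes these inputs
    | some v =>
      let posi' := if v > 0 then posi + 1 else posi
      let neg'  := if v > 0 then neg else neg + 1
      negpos lista (pos + 1) (dif + (posi' - neg')) 0 0
termination_by ((lista.length : Int) - pos).toNat
decreasing_by
  have hr : ¬ ¬ PySem.Raise.InRange lista.length pos := by
    intro hc
    rw [(PySem.List.pyGet?_eq_none_iff _ _).mpr hc] at h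
    simp at h
  unfold PySem.Raise.InRange at hr
  omega

-- ===== PORT B =====
-- B: closed form — dif plus a one-time posi - neg plus the generator sum over range(pos, len(lista))
def negpos_alt (lista : List Int) (pos : Int) (dif : Int) (posi : Int) (neg : Int) : Int :=
  if pos = (lista.length : Int) then dif
  else
    let tail := (PySem.List.pyRange pos (lista.length : Int) 1).foldl
      (fun acc i => acc +
        match PySem.List.pyGet? lista i with
        | some w => if w > 0 then (1 : Int) else -1
        | none => 0) 0   -- 'none' is the sum's IndexError; unreachable inside Pre_negpos
    dif + posi - neg + tail

-- ===== PRECONDITION & SPEC =====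
-- Pre_ excludes exactly the inputs on which the Python A raises IndexError: pos outside [-len, len].
def Pre_negpos (lista : List Int) (pos : Int) (dif : Int) (posi : Int) (neg : Int) : Prop :=
  -(lista.length : Int) ≤ pos ∧ pos ≤ (lista.length : Int)
instance (lista : List Int) (pos : Int) (dif : Int) (posi : Int) (neg : Int) : Decidable (Pre_negpos lista pos dif posi neg) := by unfold Pre_negpos; infer_instance
def pvWitness_negpos : List Int × Int × Int × Int × Int := ([1, -2, 3], 0, 0, 0, 0)


def Spec_negpos (lista : List Int) (pos : Int) (dif : Int) (posi : Int) (neg : Int) (out : Int) : Prop := out = negpos_alt lista pos dif posi neg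
instance (lista : List Int) (pos : Int) (dif : Int) (posi : Int) (neg : Int) (out : Int) : Decidable (Spec_negpos lista pos dif posi neg out) := by unfold Spec_negpos; infer_instance

-- ===== CLAIM =====
def Claim_equal_negpos : Prop := ∀ (lista : List Int) (pos : Int) (dif : Int) (posi : Int) (neg : Int), Dom_negpos lista pos dif posi neg → Pre_negpos lista pos dif posi neg → Spec_negpos lista pos dif posi neg (negpos lista pos dif posi neg)

-- ===== LEMMAS AND PROOFS =====

-- the ±1 step B sums over the tail indices
def pvStep (lista : List Int) (i : Int) : Int :=
  match PySem.List.pyGet? lista i with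
  | some w => if w > 0 then (1 : Int) else -1
  | none => 0

-- A's recursion computes dif, plus a one-time posi − neg and the ±1 sum when pos has not reached len
theorem negpos_eq_sum (n : Nat) : ∀ (lista : List Int) (pos dif posi neg : Int),
    (((lista.length : Int) - pos).toNat = n) →
    -(lista.length : Int) ≤ pos → pos ≤ (lista.length : Int) →
    negpos lista pos dif posi neg
      = if pos = (lista.length : Int) then dif
        else dif + (posi - neg) + ((PySem.List.pyRange pos (lista.length : Int) 1).map (pvStep lista)).sum := by
  induction n with
  | zero =>
    intro lista pos dif posi neg hn h1 h2
    have hp : pos = (lista.length : Int) := by omega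
    rw [negpos]
    simp [hp]
  | succ m ih =>
    intro lista pos dif posi neg hn h1 h2
    rw [negpos]
    by_cases hp : pos = (lista.length : Int)
    · simp [hp]
    · simp only [hp, if_false]
      cases h : PySem.List.pyGet? lista pos with
      | none =>
        exact absurd ((PySem.List.pyGet?_eq_none_iff _ _).mp h)
          (by unfold PySem.Raise.InRange; simp; omega)
      | some v =>
        dsimp only
        have hm : (((lista.length : Int) - (pos + 1)).toNat = m) := by omega
        rw [ih lista (pos + 1) (dif + ((if v > 0 then posi + 1 else posi) - (if v > 0 then neg else neg + 1))) 0 0 hm (by omega) (by omega)]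
        have hcons : PySem.List.pyRange pos (lista.length : Int) 1
            = pos :: PySem.List.pyRange (pos + 1) (lista.length : Int) 1 :=
          PySem.List.pyRange_one_cons (by omega)
        rw [hcons]
        have hstep : pvStep lista pos = if v > 0 then (1 : Int) else -1 := by
          unfold pvStep; rw [h]
        by_cases hp1 : pos + 1 = (lista.length : Int)
        · rw [if_pos hp1,
            show PySem.List.pyRange (pos + 1) (lista.length : Int) 1 = []
              from PySem.List.pyRange_one_eq_nil (by omega)]
          simp only [List.map_cons, List.map_nil, List.sum_cons, List.sum_nil, hstep]
          by_cases hv : v > 0 <;> simp [hv] <;> ring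
        · rw [if_neg hp1]
          simp only [List.map_cons, List.sum_cons, hstep]
          by_cases hv : v > 0 <;> simp [hv] <;> ring

-- ===== VERDICT =====
theorem negpos_spec : Claim_equal_negpos := by
  intro lista pos dif posi neg _ hpre
  unfold Spec_negpos negpos_alt
  rw [negpos_eq_sum (((lista.length : Int) - pos).toNat) lista pos dif posi neg rfl hpre.1 hpre.2]
  by_cases hp : pos = (lista.length : Int)
  · simp [hp]
  · simp only [hp, if_false]
    rw [PySem.List.foldl_add]
    have hmap : ((PySem.List.pyRange pos (lista.length : Int) 1).map
        (fun i => match PySem.List.pyGet? lista i with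
          | some w => if w > 0 then (1 : Int) else -1
          | none => 0)) = (PySem.List.pyRange pos (lista.length : Int) 1).map (pvStep lista) := by
      apply List.map_congr_left; intro i _; unfold pvStep; rfl
    rw [hmap]
    ring
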